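-- pv_equiv track=rewrite | github.com/Hulyamr13/hackerrank | Bridges and Harbors.py | cmn
-- ===== SOURCE A (Python) =====
-- import math
-- from typing import List
--
-- def cmn(m: int, n: int, mod: int) -> List[int]:
--     n = min(m, n)
--     factors = get_factors(mod)
--     powers = [0] * len(factors)
--     c_powers = [0] * len(factors)
--     ups = [0] * len(factors)
--
--     for i in range(len(factors)):
--         p = factors[i]
--         power = 1
--         while mod % p == 0:
--             mod //= p
--             power *= p
--         powers[i] = power
--         ups[i] = c_powers[i] = 1
--
--     result = [0] * (n + 1)
--     result[0] = 1
--
--     for i in range(n):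
--         lcm = 1
--         c_result = 0
--
--         for j in range(len(factors)):
--             p = factors[j]
--             power = powers[j]
--             mul_up = m - i
--             mul_down = i + 1
--
--             while mul_up % p == 0:
--                 mul_up //= p
--                 c_powers[j] *= p
--
--             while mul_down % p == 0:
--                 mul_down //= p
--                 c_powers[j] //= p
--
--             ups[j] = ups[j] * mul_up % power * inv_mod(mul_down, power) % power
--             c_result = crt(power, ups[j] * c_powers[j] % power, lcm, c_result)
--             lcm *= power
--
--         result[i + 1] = c_result
--
--     return result
--
-- def crt(p1: int, m1: int, p2: int, m2: int) -> int:
--     result = m2 - m1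
--     inv = inv_mod(p1, p2)
--     result = result * inv % p2
--     result = result * p1 + m1
--
--     if result < 0:
--         result += p1 * p2
--
--     return result
--
-- def get_factors(n: int) -> List[int]:
--     result = []
--     for i in range(2, int(math.sqrt(n)) + 1):
--         if i * i > n:
--             break
--         if n % i == 0:
--             result.append(i)
--             while n % i == 0:
--                 n //= i
--
--     if n != 1:
--         result.append(n)
--     return result
--
-- def inv_mod(e: int, f: int) -> int:
--     x2, x3 = 0, f
--     y2, y3 = 1, e
--
--     while True:
--         if y3 == 0:
--             return 0
--         if y3 == 1:
--             if y2 < 0: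
--                 y2 += f
--             return y2
--
--         q = x3 // y3
--         t2 = x2 - q * y2
--         t3 = x3 - q * y3
--         x2, x3 = y2, y3
--         y2, y3 = t2, t3
-- ===== SOURCE B (Python) =====
-- from typing import List
--
-- def cmn(m: int, n: int, mod: int) -> List[int]:
--     # Exact big-integer Pascal-row recurrence: c = C(m, i) exactly, reduced mod `mod` per entry.
--     n = min(m, n)
--     result = []
--     c = 1
--     for i in range(n + 1):
--         result.append(c % mod)
--         c = c * (m - i) // (i + 1)
--     return result
-- ===== Notes on version B (the rewrite author's own statement) =====
-- stated objective: simpler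
-- what changed: Replaces the whole per-prime-power machinery (trial-division factorization, p-adic bookkeeping, extended-Euclid modular inverses and a CRT recombination fold) by the exact big-integer Pascal-row recurrence c = c*(m-i)//(i+1), reducing each exact binomial mod `mod` as it is emitted.
-- intended difference: When mod = 1, A returns 1 at index 0 (result[0] is hard-coded to 1 and never reduced) while B returns 0 there (all later entries agree); every residue modulo 1 is 0, so B's value is the intended one. — e.g. on cmn(2, 2, 1): A returns [1, 0, 0], B returns [0, 0, 0]
import Mathlib
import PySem

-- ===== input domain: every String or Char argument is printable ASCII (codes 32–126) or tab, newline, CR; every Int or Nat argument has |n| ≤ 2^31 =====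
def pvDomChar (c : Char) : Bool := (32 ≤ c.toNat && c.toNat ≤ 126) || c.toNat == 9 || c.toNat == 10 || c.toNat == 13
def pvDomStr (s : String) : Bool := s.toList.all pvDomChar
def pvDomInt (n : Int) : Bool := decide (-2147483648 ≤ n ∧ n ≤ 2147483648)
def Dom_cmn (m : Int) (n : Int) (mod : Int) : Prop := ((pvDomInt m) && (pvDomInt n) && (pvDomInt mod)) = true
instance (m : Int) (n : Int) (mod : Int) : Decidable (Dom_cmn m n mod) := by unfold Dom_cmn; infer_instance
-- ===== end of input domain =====

-- B replaces A's factorization / modular-inverse / CRT machinery by the exact big-integer Pascal-row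
-- recurrence c = c*(m-i)//(i+1) reduced mod `mod` per entry (objective: simpler; not faster at scale).

-- ===== PORT A =====
-- `while n % i == 0: n //= i` (inside get_factors); fuel = n.toNat bounds the iteration count
def gfStripF : Nat → Int → Int → Int
  | 0, n, _ => n
  | fu+1, n, i => if PySem.Int.mod n i = 0 ∧ 2 ≤ i ∧ 1 ≤ n then gfStripF fu (PySem.Int.floordiv n i) i else n

-- `while x % p == 0: x //= p; acc *= p` (the `power` loop and the `mul_up` loop)
def stripMulF : Nat → Int → Int → Int → Int × Int
  | 0, x, _, acc => (x, acc)
  | fu+1, x, p, acc =>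
    if PySem.Int.mod x p = 0 ∧ 2 ≤ p ∧ 1 ≤ x then stripMulF fu (PySem.Int.floordiv x p) p (acc * p)
    else (x, acc)

-- `while x % p == 0: x //= p; acc //= p` (the `mul_down` loop)
def stripDivF : Nat → Int → Int → Int → Int × Int
  | 0, x, _, acc => (x, acc)
  | fu+1, x, p, acc =>
    if PySem.Int.mod x p = 0 ∧ 2 ≤ p ∧ 1 ≤ x then
      stripDivF fu (PySem.Int.floordiv x p) p (PySem.Int.floordiv acc p)
    else (x, acc)

-- `for i in range(2, int(math.sqrt(n))+1): …` with the `break`; fuel = number of remaining range values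
def gfLoopF : Nat → Int → Int → List Int → List Int × Int
  | 0, _, n, acc => (acc, n)
  | k+1, i, n, acc =>
    if i * i > n then (acc, n)
    else if PySem.Int.mod n i = 0 then gfLoopF k (i+1) (gfStripF n.toNat n i) (acc ++ [i])
    else gfLoopF k (i+1) n acc

-- integer square root by counting up (kernel-reducible); isqrtF n n 0 = Nat.sqrt n (lemma isqrtF_eq_sqrt below)
def isqrtF : Nat → Nat → Nat → Nat
  | 0, _, r => r
  | fu+1, n, r => if (r+1)*(r+1) ≤ n then isqrtF fu n (r+1) else r

-- int(math.sqrt(n)) is the integer square root of n.toNat exactly on 0 ≤ n ≤ 2^31 (the Dom range); n < 0 raises (outside Pre_)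
-- the trailing `if n != 1: result.append(n)` of get_factors
def gfOut (r : List Int × Int) : List Int := if r.2 ≠ 1 then r.1 ++ [r.2] else r.1

def getFactors (n : Int) : List Int :=
  gfOut (gfLoopF (((isqrtF n.toNat n.toNat 0 : Int) + 1) - 2).toNat 2 n [])

-- inv_mod's `while True` extended-Euclid loop; fuel = y3.natAbs + 1 bounds the iterations
def invLoopF : Nat → Int → Int → Int → Int → Int → Int
  | 0, _, _, _, _, _ => 0
  | fu+1, f, x2, x3, y2, y3 =>
    if y3 = 0 then 0
    else if y3 = 1 then (if y2 < 0 then y2 + f else y2)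
    else
      invLoopF fu f y2 y3 (x2 - PySem.Int.floordiv x3 y3 * y2) (x3 - PySem.Int.floordiv x3 y3 * y3)

def invMod (e f : Int) : Int := invLoopF (e.natAbs + 1) f 0 f 1 e

def crt (p1 m1 p2 m2 : Int) : Int :=
  let r1 := PySem.Int.mod ((m2 - m1) * invMod p1 p2) p2
  let r2 := r1 * p1 + m1
  if r2 < 0 then r2 + p1 * p2 else r2

-- the `for j in range(len(factors))` body; entries pair factors[j] with (powers[j], (c_powers[j], ups[j]))
def cmnInner (m i : Int) (entries : List (Int × Int × Int × Int)) : Int × Int × List Int × List Int :=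
  entries.foldl (fun a e =>
    let s1 := stripMulF (m - i).toNat (m - i) e.1 e.2.2.1
    let s2 := stripDivF (i + 1).toNat (i + 1) e.1 s1.2
    let up' := PySem.Int.mod (PySem.Int.mod (e.2.2.2 * s1.1) e.2.1 * invMod s2.1 e.2.1) e.2.1
    (a.1 * e.2.1, crt e.2.1 (PySem.Int.mod (up' * s2.2) e.2.1) a.1 a.2.1,
     a.2.2.1 ++ [s2.2], a.2.2.2 ++ [up'])) (1, 0, ([] : List Int), ([] : List Int))

def cmn (m : Int) (n : Int) (mod : Int) : List Int :=
  let n' := min m n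
  let factors := getFactors mod
  let powers := (factors.foldl (fun (st : Int × List Int) p =>
      let s := stripMulF st.1.toNat st.1 p 1
      (s.1, st.2 ++ [s.2])) (mod, [])).2
  let res0 := PySem.List.pySetD (List.replicate (n' + 1).toNat 0) 0 1
  let fin := (PySem.List.pyRange 0 n' 1).foldl (fun st i =>
      let inner := cmnInner m i (factors.zip (powers.zip (st.1.zip st.2.1)))
      (inner.2.2.1, inner.2.2.2, PySem.List.pySetD st.2.2 (i + 1) inner.2.1))
    (List.replicate factors.length 1, List.replicate factors.length 1, res0)
  fin.2.2

-- ===== PORT B =====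
def cmn_alt (m : Int) (n : Int) (mod : Int) : List Int :=
  let n' := min m n
  ((PySem.List.pyRange 0 (n' + 1) 1).foldl
    (fun (st : List Int × Int) i =>
      (st.1 ++ [PySem.Int.mod st.2 mod], PySem.Int.floordiv (st.2 * (m - i)) (i + 1)))
    ([], 1)).1



-- ===== PRECONDITION & SPEC =====
-- Pre_ excludes exactly the inputs where A raises: mod ≤ 0 (math.sqrt ValueError / `mod % 0` ZeroDivisionError)
-- and min(m,n) < 0 (`result[0] = 1` IndexError on the empty list [0]*(n+1)).
def Pre_cmn (m : Int) (n : Int) (mod : Int) : Prop := 1 ≤ mod ∧ 0 ≤ min m n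
instance (m : Int) (n : Int) (mod : Int) : Decidable (Pre_cmn m n mod) := by unfold Pre_cmn; infer_instance
def pvWitness_cmn : Int × Int × Int := (5, 3, 12)

-- When mod = 1, A returns 1 at index 0 (result[0] is hard-coded to 1, never reduced) while B returns 0 there
-- (all later entries agree); every residue modulo 1 is 0, so B's value is the intended one.
def D_cmn (m : Int) (n : Int) (mod : Int) : Prop := mod = 1
instance (m : Int) (n : Int) (mod : Int) : Decidable (D_cmn m n mod) := by unfold D_cmn; infer_instance

def Spec_cmn (m : Int) (n : Int) (mod : Int) (out : List Int) : Prop := ¬ D_cmn m n mod → out = cmn_alt m n mod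
instance (m : Int) (n : Int) (mod : Int) (out : List Int) : Decidable (Spec_cmn m n mod out) := by
  unfold Spec_cmn; infer_instance

def pvDiffWitness_cmn : Int × Int × Int := (2, 2, 1)
def pvDiffWitnessOut_cmn : (List Int) × (List Int) := ([1, 0, 0], [0, 0, 0])

-- ===== CLAIM (what is proved, stated in full; the proofs are below) =====
def Claim_unchanged_cmn : Prop := ∀ (m : Int) (n : Int) (mod : Int), Dom_cmn m n mod → Pre_cmn m n mod → Spec_cmn m n mod (cmn m n mod)
def Claim_changed_cmn : Prop := Dom_cmn (pvDiffWitness_cmn.1) (pvDiffWitness_cmn.2.1) (pvDiffWitness_cmn.2.2) ∧ Pre_cmn (pvDiffWitness_cmn.1) (pvDiffWitness_cmn.2.1) (pvDiffWitness_cmn.2.2) ∧ D_cmn (pvDiffWitness_cmn.1) (pvDiffWitness_cmn.2.1) (pvDiffWitness_cmn.2.2) ∧ cmn (pvDiffWitness_cmn.1) (pvDiffWitness_cmn.2.1) (pvDiffWitness_cmn.2.2) = pvDiffWitnessOut_cmn.1 ∧ cmn_alt (pvDiffWitness_cmn.1) (pvDiffWitness_cmn.2.1) (pvDiffWitness_cmn.2.2)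 = pvDiffWitnessOut_cmn.2 ∧ pvDiffWitnessOut_cmn.1 ≠ pvDiffWitnessOut_cmn.2
def Claim_exact_cmn : Prop := ∀ (m : Int) (n : Int) (mod : Int), Dom_cmn m n mod → Pre_cmn m n mod → D_cmn m n mod → cmn m n mod ≠ cmn_alt m n mod

-- ===== LEMMAS AND PROOFS =====
-- ---------- square root ----------
theorem isqrtF_go (fu : Nat) : ∀ (n r : Nat), r ≤ Nat.sqrt n → Nat.sqrt n ≤ r + fu →
    isqrtF fu n r = Nat.sqrt n := by
  induction fu with
  | zero => intro n r h1 h2; simp [isqrtF]; omega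
  | succ fu ih =>
    intro n r h1 h2
    simp only [isqrtF]
    by_cases h : (r+1)*(r+1) ≤ n
    · have : r + 1 ≤ Nat.sqrt n := Nat.le_sqrt.mpr h
      rw [if_pos h]
      exact ih n (r+1) this (by omega)
    · have : Nat.sqrt n ≤ r := by
        by_contra hc
        exact h (Nat.le_sqrt.mp (by omega))
      rw [if_neg h]
      omega

theorem isqrtF_eq_sqrt (n : Nat) : isqrtF n n 0 = Nat.sqrt n :=
  isqrtF_go n n 0 (Nat.zero_le _) (by simpa using Nat.sqrt_le_self n)

-- ---------- factor-stripping loops ----------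
theorem stripMulF_spec (fu : Nat) : ∀ (a q : Nat) (acc : Int), q.Prime → 1 ≤ a → a ≤ fu →
    stripMulF fu (a : Int) (q : Int) acc
      = (((a / q ^ a.factorization q : Nat) : Int), acc * ((q ^ a.factorization q : Nat) : Int)) := by
  induction fu with
  | zero => intro a q acc _ h1 h2; omega
  | succ fu ih =>
    intro a q acc hq h1 h2
    have hq2 : 2 ≤ q := hq.two_le
    simp only [stripMulF, PySem.Int.mod_natCast, PySem.Int.floordiv_natCast]
    by_cases hd : q ∣ a
    · have hmod : a % q = 0 := Nat.mod_eq_zero_of_dvd hd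
      rw [if_pos (by push_cast; omega)]
      set b := a / q with hb
      have hab : a = q * b := (Nat.mul_div_cancel' hd).symm
      have hb1 : 1 ≤ b := Nat.div_pos (Nat.le_of_dvd (by omega) hd) (by omega)
      have hbfu : b ≤ fu := by
        have : b < a := Nat.div_lt_self (by omega) (by omega)
        omega
      rw [ih b q (acc * (q : Int)) hq hb1 hbfu]
      have hfac : a.factorization q = b.factorization q + 1 := by
        rw [hab, Nat.factorization_mul (by omega) (by omega)]
        simp [hq.factorization_self]
        omega
      refine Prod.ext ?_ ?_
      · show ((b / q ^ b.factorization q : Nat) : Int) = ((a / q ^ a.factorization q : Nat) : Int)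
        rw [hfac, hab, pow_succ, mul_comm (q ^ b.factorization q) q,
          Nat.mul_div_mul_left _ _ (by omega : 0 < q)]
      · show acc * (q : Int) * ((q ^ b.factorization q : Nat) : Int) = acc * ((q ^ a.factorization q : Nat) : Int)
        rw [hfac, pow_succ]
        push_cast
        ring
    · have hmod : ¬ (a % q = 0) := fun h => hd (Nat.dvd_of_mod_eq_zero h)
      rw [if_neg (by push_cast; omega)]
      have hf0 : a.factorization q = 0 := Nat.factorization_eq_zero_of_not_dvd hd
      simp [hf0]

theorem gfStripF_spec (fu : Nat) : ∀ (a q : Nat), q.Prime → 1 ≤ a → a ≤ fu →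
    gfStripF fu (a : Int) (q : Int) = ((a / q ^ a.factorization q : Nat) : Int) := by
  induction fu with
  | zero => intro a q _ h1 h2; omega
  | succ fu ih =>
    intro a q hq h1 h2
    have hq2 : 2 ≤ q := hq.two_le
    simp only [gfStripF, PySem.Int.mod_natCast, PySem.Int.floordiv_natCast]
    by_cases hd : q ∣ a
    · have hmod : a % q = 0 := Nat.mod_eq_zero_of_dvd hd
      rw [if_pos (by push_cast; omega)]
      set b := a / q with hb
      have hab : a = q * b := (Nat.mul_div_cancel' hd).symm
      have hb1 : 1 ≤ b := Nat.div_pos (Nat.le_of_dvd (by omega) hd) (by omega)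
      have hbfu : b ≤ fu := by
        have : b < a := Nat.div_lt_self (by omega) (by omega)
        omega
      rw [ih b q hq hb1 hbfu]
      have hfac : a.factorization q = b.factorization q + 1 := by
        rw [hab, Nat.factorization_mul (by omega) (by omega)]
        simp [hq.factorization_self]
        omega
      rw [hfac, hab, pow_succ, mul_comm (q ^ b.factorization q) q,
        Nat.mul_div_mul_left _ _ (by omega : 0 < q)]
    · have hmne : a % q ≠ 0 := fun h => hd (Nat.dvd_of_mod_eq_zero h)
      rw [if_neg (by push_cast; omega)]
      simp [Nat.factorization_eq_zero_of_not_dvd hd]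

theorem stripDivF_spec (fu : Nat) : ∀ (a q s : Nat), q.Prime → 1 ≤ a → a ≤ fu → a.factorization q ≤ s →
    stripDivF fu (a : Int) (q : Int) ((q ^ s : Nat) : Int)
      = (((a / q ^ a.factorization q : Nat) : Int), ((q ^ (s - a.factorization q) : Nat) : Int)) := by
  induction fu with
  | zero => intro a q s _ h1 h2 _; omega
  | succ fu ih =>
    intro a q s hq h1 h2 hs
    have hq2 : 2 ≤ q := hq.two_le
    simp only [stripDivF, PySem.Int.mod_natCast, PySem.Int.floordiv_natCast]
    by_cases hd : q ∣ a
    · have hmod : a % q = 0 := Nat.mod_eq_zero_of_dvd hd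
      rw [if_pos (by push_cast; omega)]
      set b := a / q with hb
      have hab : a = q * b := (Nat.mul_div_cancel' hd).symm
      have hb1 : 1 ≤ b := Nat.div_pos (Nat.le_of_dvd (by omega) hd) (by omega)
      have hbfu : b ≤ fu := by
        have : b < a := Nat.div_lt_self (by omega) (by omega)
        omega
      have hfac : a.factorization q = b.factorization q + 1 := by
        rw [hab, Nat.factorization_mul (by omega) (by omega)]
        simp [hq.factorization_self]
        omega
      have hpos : 0 < a.factorization q := hq.factorization_pos_of_dvd (by omega) hd
      have hs1 : 1 ≤ s := by omega
      have hpow : q ^ s / q = q ^ (s - 1) := by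
        obtain ⟨t, rfl⟩ : ∃ t, s = t + 1 := ⟨s - 1, by omega⟩
        simp [pow_succ, Nat.mul_div_cancel _ (show 0 < q by omega)]
      rw [hpow, ih b q (s-1) hq hb1 hbfu (by omega)]
      refine Prod.ext ?_ ?_
      · show ((b / q ^ b.factorization q : Nat) : Int) = ((a / q ^ a.factorization q : Nat) : Int)
        rw [hfac, hab, pow_succ, mul_comm (q ^ b.factorization q) q,
          Nat.mul_div_mul_left _ _ (by omega : 0 < q)]
      · show ((q ^ (s - 1 - b.factorization q) : Nat) : Int) = ((q ^ (s - a.factorization q) : Nat) : Int)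
        congr 2
        omega
    · have hmne : a % q ≠ 0 := fun h => hd (Nat.dvd_of_mod_eq_zero h)
      rw [if_neg (by push_cast; omega)]
      simp [Nat.factorization_eq_zero_of_not_dvd hd]

-- ---------- extended Euclid ----------
theorem invLoopF_spec (fu : Nat) : ∀ (f e x2 x3 y2 y3 : Int), 1 ≤ f → 1 ≤ x3 → 1 ≤ y3 →
    Int.gcd x3 y3 = 1 → x3 ≡ x2 * e [ZMOD f] → y3 ≡ y2 * e [ZMOD f] → y3.natAbs < fu →
    e * invLoopF fu f x2 x3 y2 y3 ≡ 1 [ZMOD f] := by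
  induction fu with
  | zero => intro f e x2 x3 y2 y3 _ _ _ _ _ _ h; omega
  | succ fu ih =>
    intro f e x2 x3 y2 y3 hf hx3 hy3 hg hcx hcy hfu
    simp only [invLoopF]
    rw [if_neg (by omega)]
    by_cases h1 : y3 = 1
    · rw [if_pos h1]
      have h1' : y2 * e ≡ 1 [ZMOD f] := by
        calc y2 * e ≡ y3 [ZMOD f] := hcy.symm
        _ = 1 := h1
      by_cases hneg : y2 < 0
      · rw [if_pos hneg]
        calc e * (y2 + f) ≡ e * y2 [ZMOD f] := by
              have he : e * (y2 + f) = e * y2 + f * e := by ring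
              rw [he]
              exact Int.modEq_add_fac_self
        _ ≡ 1 [ZMOD f] := by rw [mul_comm]; exact h1'
      · rw [if_neg hneg]
        rw [mul_comm]; exact h1'
    · rw [if_neg h1]
      have hy3' : 2 ≤ y3 := by omega
      set q := PySem.Int.floordiv x3 y3 with hq
      have hmodeq : x3 - q * y3 = PySem.Int.mod x3 y3 := by
        have hfm := PySem.Int.floordiv_mul_add_mod x3 y3
        rw [← hq] at hfm
        omega
      have ht3lo : 0 ≤ x3 - q * y3 := by
        rw [hmodeq]; exact PySem.Int.mod_nonneg _ (by omega)
      have ht3hi : x3 - q * y3 < y3 := by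
        rw [hmodeq]; exact PySem.Int.mod_lt _ (by omega)
      have hgcd' : Int.gcd y3 (x3 - q * y3) = 1 := by
        rw [Int.gcd_comm]
        calc Int.gcd (x3 - q * y3) y3 = Int.gcd (x3 + y3 * (-q)) y3 := by ring_nf
        _ = Int.gcd x3 y3 := Int.gcd_add_mul_left_left y3 x3 (-q)
        _ = 1 := hg
      have ht3pos : 1 ≤ x3 - q * y3 := by
        rcases lt_or_ge 0 (x3 - q * y3) with h | h
        · omega
        · exfalso
          have hz : x3 - q * y3 = 0 := by omega
          rw [hz] at hgcd'
          simp [Int.gcd] at hgcd'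
          omega
      exact ih f e y2 y3 (x2 - q * y2) (x3 - q * y3) hf hy3 ht3pos hgcd'
        hcy (by
          have e1 : (x2 - q * y2) * e = x2 * e - q * (y2 * e) := by ring
          rw [e1]
          exact hcx.sub (hcy.mul_left q)) (by omega)

theorem invMod_spec (e f : Int) (he : 1 ≤ e) (hf : 1 ≤ f) (hg : Int.gcd e f = 1) :
    e * invMod e f ≡ 1 [ZMOD f] := by
  unfold invMod
  refine invLoopF_spec (e.natAbs + 1) f e 0 f 1 e hf hf he (by rw [Int.gcd_comm]; exact hg)
    ?_ (by simp) (by omega)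
  simp [Int.ModEq]

theorem crt_spec (p1 m1 p2 m2 : Int) (hp1 : 1 ≤ p1) (hp2 : 1 ≤ p2) (hg : Int.gcd p1 p2 = 1)
    (h0 : 0 ≤ m1) (h1 : m1 < p1) :
    0 ≤ crt p1 m1 p2 m2 ∧ crt p1 m1 p2 m2 < p1 * p2 ∧
    crt p1 m1 p2 m2 ≡ m1 [ZMOD p1] ∧ crt p1 m1 p2 m2 ≡ m2 [ZMOD p2] := by
  unfold crt
  set r1 := PySem.Int.mod ((m2 - m1) * invMod p1 p2) p2 with hr1
  have hr1lo : 0 ≤ r1 := PySem.Int.mod_nonneg _ (by omega)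
  have hr1hi : r1 < p2 := PySem.Int.mod_lt _ (by omega)
  have hbound : 0 ≤ r1 * p1 + m1 ∧ r1 * p1 + m1 < p1 * p2 := by
    constructor
    · positivity
    · nlinarith
  rw [if_neg (by omega)]
  refine ⟨by omega, by omega, ?_, ?_⟩
  · have he : r1 * p1 + m1 = m1 + p1 * r1 := by ring
    rw [he]
    exact Int.modEq_add_fac_self
  · have hinv := invMod_spec p1 p2 hp1 hp2 hg
    have hr1e : r1 ≡ (m2 - m1) * invMod p1 p2 [ZMOD p2] := by
      rw [hr1, PySem.Int.mod_eq_emod_of_pos (show (0:Int) < p2 by omega)]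
      exact Int.emod_emod_of_dvd _ dvd_rfl
    calc r1 * p1 + m1
        ≡ ((m2 - m1) * invMod p1 p2) * p1 + m1 [ZMOD p2] := (hr1e.mul_right p1).add_right m1
      _ = (m2 - m1) * (p1 * invMod p1 p2) + m1 := by ring
      _ ≡ (m2 - m1) * 1 + m1 [ZMOD p2] := (hinv.mul_left (m2 - m1)).add_right m1
      _ = m2 := by ring

-- ---------- trial division ----------
theorem end_prime (a : Nat) (i : Int) (h1 : 1 ≤ a) (h0 : 0 ≤ i)
    (hfac : ∀ q : Nat, q.Prime → q ∣ a → i ≤ (q : Int)) (hii : (a : Int) < i * i) :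
    a = 1 ∨ a.Prime := by
  by_cases ha1 : a = 1
  · exact Or.inl ha1
  by_cases hp : a.Prime
  · exact Or.inr hp
  exfalso
  have hmf : a.minFac.Prime := Nat.minFac_prime ha1
  have hle : i ≤ (a.minFac : Int) := hfac a.minFac hmf (Nat.minFac_dvd a)
  have hsq : a.minFac ^ 2 ≤ a := Nat.minFac_sq_le_self (by omega) hp
  have : ((a.minFac : Int)) * (a.minFac : Int) ≤ (a : Int) := by
    have := hsq
    push_cast [pow_two] at this ⊢
    exact_mod_cast this
  nlinarith [mul_le_mul hle hle h0 (le_trans h0 hle)]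

theorem gfLoopF_inv (M : Nat) (hM : 1 ≤ M) : ∀ (k : Nat) (i : Int) (a : Nat) (accN : List Nat),
    2 ≤ i → 1 ≤ a → a ∣ M →
    (∀ q : Nat, q.Prime → q ∣ a → i ≤ (q : Int)) →
    (∀ q : Nat, q.Prime → q ∣ M → q ∈ accN ∨ q ∣ a) →
    (∀ q ∈ accN, q.Prime ∧ q ∣ M ∧ (q : Int) < i) →
    accN.Nodup →
    i + (k : Int) = ((Nat.sqrt M : Nat) : Int) + 1 →
    ∃ (L : List Nat) (b : Nat),
      gfLoopF k i (a : Int) (accN.map (fun q : Nat => (q : Int))) = (L.map (fun q : Nat => (q : Int)), (b : Int)) ∧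
      L.Nodup ∧ (∀ q ∈ L, q.Prime ∧ q ∣ M) ∧ (∀ q : Nat, q.Prime → q ∣ M → q ∈ L ∨ q ∣ b) ∧
      (b = 1 ∨ (b.Prime ∧ b ∣ M ∧ b ∉ L)) := by
  intro k
  induction k with
  | zero =>
    intro i a accN hi ha haM hfac hcomp hacc hnd hstop
    refine ⟨accN, a, rfl, hnd, fun q hq => ⟨(hacc q hq).1, (hacc q hq).2.1⟩, hcomp, ?_⟩
    have hsq : (a : Int) < i * i := by
      have h1 : (a : Int) ≤ (M : Int) := by exact_mod_cast Nat.le_of_dvd (by omega) haM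
      have h2 : M < (Nat.sqrt M + 1) * (Nat.sqrt M + 1) := by
        have h := Nat.lt_succ_sqrt' M
        rw [pow_two] at h
        simpa [Nat.succ_eq_add_one] using h
      have h3 : (M : Int) < ((Nat.sqrt M + 1 : Nat) : Int) * ((Nat.sqrt M + 1 : Nat) : Int) := by
        exact_mod_cast h2
      have hi' : i = ((Nat.sqrt M + 1 : Nat) : Int) := by push_cast at hstop ⊢; omega
      rw [hi']
      exact lt_of_le_of_lt h1 h3
    rcases end_prime a i ha (by omega) hfac hsq with h | h
    · exact Or.inl h
    · refine Or.inr ⟨h, haM, ?_⟩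
      · intro hmem
        have := (hacc a hmem).2.2
        have := hfac a h dvd_rfl
        omega
  | succ k ih =>
    intro i a accN hi ha haM hfac hcomp hacc hnd hstop
    simp only [gfLoopF]
    by_cases hbrk : i * i > (a : Int)
    · rw [if_pos hbrk]
      refine ⟨accN, a, rfl, hnd, fun q hq => ⟨(hacc q hq).1, (hacc q hq).2.1⟩, hcomp, ?_⟩
      rcases end_prime a i ha (by omega) hfac hbrk with h | h
      · exact Or.inl h
      · refine Or.inr ⟨h, haM, ?_⟩
        intro hmem
        have := (hacc a hmem).2.2
        have := hfac a h dvd_rfl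
        omega
    · rw [if_neg hbrk]
      set iN := i.toNat with hiN
      have hicast : i = (iN : Int) := by omega
      by_cases hdvd : PySem.Int.mod (a : Int) i = 0
      · rw [if_pos hdvd]
        have hdvdN : iN ∣ a := by
          rw [hicast, PySem.Int.mod_natCast] at hdvd
          exact Nat.dvd_of_mod_eq_zero (by exact_mod_cast hdvd)
        have hiprime : iN.Prime := by
          have hne1 : iN ≠ 1 := by omega
          have hmf := Nat.minFac_prime hne1
          have hmfd : iN.minFac ∣ a := dvd_trans (Nat.minFac_dvd iN) hdvdN
          have hge : i ≤ (iN.minFac : Int) := hfac iN.minFac hmf hmfd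
          have hle : iN.minFac ≤ iN := Nat.minFac_le (by omega)
          have : iN.minFac = iN := by omega
          rw [← this]; exact hmf
        have hstrip : gfStripF ((a : Int)).toNat (a : Int) i = ((a / iN ^ a.factorization iN : Nat) : Int) := by
          rw [hicast, Int.toNat_natCast]
          exact gfStripF_spec a a iN hiprime ha le_rfl
        rw [hstrip]
        set b := a / iN ^ a.factorization iN with hbdef
        have hbpos : 1 ≤ b := Nat.ordCompl_pos iN (by omega)
        have hbdvd : b ∣ M := dvd_trans (Nat.ordCompl_dvd a iN) haM
        have hiM : iN ∣ M := dvd_trans hdvdN haM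
        have hmapeq : (accN.map (fun q : Nat => (q : Int))) ++ [i] = ((accN ++ [iN]).map (fun q : Nat => (q : Int))) := by
          simp [hicast]
        rw [hmapeq]
        refine ih (i+1) b (accN ++ [iN]) (by omega) hbpos hbdvd ?_ ?_ ?_ ?_ (by push_cast at hstop ⊢; omega)
        · intro q hq hqb
          have hqa : q ∣ a := dvd_trans hqb (Nat.ordCompl_dvd a iN)
          have h1 := hfac q hq hqa
          have hne : q ≠ iN := by
            intro he
            rw [he] at hqb
            exact Nat.not_dvd_ordCompl hiprime (by omega) hqb
          have : (q : Int) ≠ (iN : Int) := by exact_mod_cast hne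
          omega
        · intro q hq hqM
          rcases hcomp q hq hqM with hmem | hqa
          · exact Or.inl (List.mem_append_left _ hmem)
          · by_cases he : q = iN
            · exact Or.inl (List.mem_append_right _ (by simp [he]))
            · refine Or.inr ?_
              have hcop : Nat.Coprime q (iN ^ a.factorization iN) :=
                Nat.Coprime.pow_right _ ((Nat.coprime_primes hq hiprime).mpr he)
              have : a = iN ^ a.factorization iN * b := (Nat.ordProj_mul_ordCompl_eq_self a iN).symm
              exact hcop.dvd_of_dvd_mul_left (by rw [← this]; exact hqa)
        · intro q hq
          rcases List.mem_append.mp hq with hmem | hmem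
          · have := hacc q hmem
            exact ⟨this.1, this.2.1, by omega⟩
          · have : q = iN := by simpa using hmem
            rw [this]
            exact ⟨hiprime, hiM, by omega⟩
        · refine List.Nodup.append hnd (List.nodup_singleton _) ?_
          intro q hq1 hq2
          have h2 : q = iN := by simpa using hq2
          have h3 := (hacc q hq1).2.2
          rw [h2] at h3
          omega
      · rw [if_neg hdvd]
        refine ih (i+1) a accN (by omega) ha haM ?_ hcomp
          (fun q hq => ⟨(hacc q hq).1, (hacc q hq).2.1, by have := (hacc q hq).2.2; omega⟩)
          hnd (by push_cast at hstop ⊢; omega)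
        intro q hq hqa
        have h1 := hfac q hq hqa
        have hne : (q : Int) ≠ i := by
          intro he
          apply hdvd
          rw [← he, PySem.Int.mod_natCast]
          exact_mod_cast congrArg (Nat.cast : Nat → Int) (Nat.mod_eq_zero_of_dvd hqa)
        omega

theorem getFactors_spec (mod : Int) (h : 1 ≤ mod) :
    ∃ L : List Nat, getFactors mod = L.map (fun q : Nat => (q : Int)) ∧ L.Nodup ∧
      (∀ q ∈ L, q.Prime ∧ q ∣ mod.toNat) ∧ (∀ q : Nat, q.Prime → q ∣ mod.toNat → q ∈ L) := by
  set M := mod.toNat with hM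
  have hmodM : mod = (M : Int) := by omega
  have hM1 : 1 ≤ M := by omega
  have hsq1 : 1 ≤ Nat.sqrt M := Nat.sqrt_pos.mpr (by omega)
  unfold getFactors gfOut
  rw [hmodM, Int.toNat_natCast, isqrtF_eq_sqrt]
  obtain ⟨L, b, heq, hnd, hprim, hcomp, hb⟩ :=
    gfLoopF_inv M hM1 ((((Nat.sqrt M : Int) + 1) - 2).toNat) 2 M []
      (le_refl 2) hM1 dvd_rfl
      (fun q hq _ => by exact_mod_cast hq.two_le)
      (fun q _ hq => Or.inr hq)
      (by simp) (List.nodup_nil) (by omega)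
  have heq2 : gfLoopF ((((Nat.sqrt M : Int) + 1) - 2).toNat) 2 (M : Int) [] =
      (L.map (fun q : Nat => (q : Int)), (b : Int)) := heq
  rw [heq2]
  by_cases hb1 : b = 1
  · subst hb1
    refine ⟨L, by simp, hnd, hprim, ?_⟩
    intro q hq hqM
    rcases hcomp q hq hqM with hmem | hdvd
    · exact hmem
    · exact absurd (Nat.dvd_one.mp hdvd) hq.ne_one
  · rcases hb with rfl | ⟨hbp, hbM, hbL⟩
    · exact absurd rfl hb1
    rw [if_pos (show ((L.map (fun q : Nat => (q : Int)), (b : Int)).2 ≠ 1) by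
      show (b : Int) ≠ 1
      exact_mod_cast hb1)]
    refine ⟨L ++ [b], by simp, ?_, ?_, ?_⟩
    · exact List.Nodup.append hnd (List.nodup_singleton _) (by
        intro q hq1 hq2
        have : q = b := by simpa using hq2
        exact hbL (this ▸ hq1))
    · intro q hq
      rcases List.mem_append.mp hq with hm | hm
      · exact hprim q hm
      · have : q = b := by simpa using hm
        rw [this]; exact ⟨hbp, hbM⟩
    · intro q hq hqM
      rcases hcomp q hq hqM with hmem | hdvd
      · exact List.mem_append_left _ hmem
      · have : q = b := ((Nat.prime_dvd_prime_iff_eq hq hbp).mp hdvd)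
        exact List.mem_append_right _ (by simp [this])

-- ---------- the prime-power table ----------
theorem powersFold (M : Nat) : ∀ (L : List Nat) (cur : Nat) (accP : List Int),
    (∀ q ∈ L, q.Prime) → 1 ≤ cur →
    (∀ q ∈ L, cur.factorization q = M.factorization q) →
    L.Nodup →
    ∃ c' : Int,
      (L.map (fun q : Nat => (q : Int))).foldl (fun (st : Int × List Int) p =>
          ((stripMulF st.1.toNat st.1 p 1).1, st.2 ++ [(stripMulF st.1.toNat st.1 p 1).2])) ((cur : Int), accP)
      = (c', accP ++ L.map (fun q : Nat => ((q ^ M.factorization q : Nat) : Int))) := by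
  intro L
  induction L with
  | nil => intro cur accP _ _ _ _; exact ⟨(cur : Int), by simp⟩
  | cons q L' ih =>
    intro cur accP hprime hcur hfact hnd
    have hq : q.Prime := hprime q (List.mem_cons_self)
    have hkey : cur.factorization q = M.factorization q := hfact q (List.mem_cons_self)
    simp only [List.map_cons, List.foldl_cons]
    obtain ⟨c', hc'⟩ := ih (cur / q ^ M.factorization q)
      (accP ++ [1 * ((q ^ M.factorization q : Nat) : Int)])
      (fun p hp => hprime p (List.mem_cons_of_mem _ hp))
      (hkey ▸ Nat.ordCompl_pos q (by omega : cur ≠ 0))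
      (fun p hp => by
        have hne : p ≠ q := by
          rintro rfl
          exact (List.nodup_cons.mp hnd).1 hp
        have h2 := Nat.factorization_ordCompl cur q
        rw [hkey] at h2
        rw [h2, Finsupp.erase_ne hne]
        exact hfact p (List.mem_cons_of_mem _ hp))
      (List.nodup_cons.mp hnd).2
    refine ⟨c', ?_⟩
    have hred : (stripMulF ((cur : Int)).toNat (cur : Int) (q : Int) 1)
        = (((cur / q ^ M.factorization q : Nat) : Int), 1 * ((q ^ M.factorization q : Nat) : Int)) := by
      rw [show ((cur : Int)).toNat = cur from Int.toNat_natCast cur]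
      rw [stripMulF_spec cur cur q 1 hq hcur le_rfl, hkey]
    rw [hred]
    show (L'.map (fun q : Nat => (q : Int))).foldl _
        (((cur / q ^ M.factorization q : Nat) : Int), accP ++ [1 * ((q ^ M.factorization q : Nat) : Int)]) = _
    rw [hc']
    simp

theorem prodPow (M : Nat) (hM : M ≠ 0) (L : List Nat) (hnd : L.Nodup)
    (hp : ∀ q ∈ L, q.Prime ∧ q ∣ M) (hc : ∀ q : Nat, q.Prime → q ∣ M → q ∈ L) :
    (L.map (fun q => q ^ M.factorization q)).prod = M := by
  have hset : L.toFinset = M.primeFactors := by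
    ext q
    simp only [List.mem_toFinset, Nat.mem_primeFactors]
    constructor
    · intro hq
      exact ⟨(hp q hq).1, (hp q hq).2, hM⟩
    · rintro ⟨h1, h2, _⟩
      exact hc q h1 h2
  rw [← List.prod_toFinset _ hnd, hset]
  have := Nat.prod_factorization_pow_eq_self hM
  rw [Finsupp.prod] at this
  rw [Nat.support_factorization] at this
  exact this

-- ---------- the inner CRT fold ----------
-- the body of A's `for j in range(len(factors))` loop, zeta-normal form
def innerStep (m i : Int) (a : Int × Int × List Int × List Int) (e : Int × Int × Int × Int) :
    Int × Int × List Int × List Int :=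
  let s1 := stripMulF (m - i).toNat (m - i) e.1 e.2.2.1
  let s2 := stripDivF (i + 1).toNat (i + 1) e.1 s1.2
  let up' := PySem.Int.mod (PySem.Int.mod (e.2.2.2 * s1.1) e.2.1 * invMod s2.1 e.2.1) e.2.1
  (a.1 * e.2.1, crt e.2.1 (PySem.Int.mod (up' * s2.2) e.2.1) a.1 a.2.1,
   a.2.2.1 ++ [s2.2], a.2.2.2 ++ [up'])

theorem cmnInner_eq (m i : Int) (entries : List (Int × Int × Int × Int)) :
    cmnInner m i entries = entries.foldl (innerStep m i) (1, 0, [], []) := rfl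

theorem pymod_modEq (x P : Int) (hP : 0 < P) : PySem.Int.mod x P ≡ x [ZMOD P] := by
  rw [PySem.Int.mod_eq_emod_of_pos hP]
  exact Int.emod_emod_of_dvd _ dvd_rfl

theorem choose_fact_eq (mm i q : Nat) (hi : i + 1 ≤ mm) :
    (mm.choose (i+1)).factorization q + (i+1).factorization q
      = (mm.choose i).factorization q + (mm - i).factorization q := by
  have hid : mm.choose (i+1) * (i+1) = mm.choose i * (mm - i) := Nat.choose_succ_right_eq mm i
  have h1 : (mm.choose (i+1) * (i+1)).factorization q = (mm.choose i * (mm - i)).factorization q := by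
    rw [hid]
  rw [Nat.factorization_mul (Nat.choose_pos hi).ne' (by omega),
      Nat.factorization_mul (Nat.choose_pos (by omega : i ≤ mm)).ne' (by omega : mm - i ≠ 0)] at h1
  simpa using h1

theorem choose_ordCompl_eq (mm i : Nat) (q : Nat) :
    (mm.choose (i+1)) / q ^ (mm.choose (i+1)).factorization q * ((i+1) / q ^ (i+1).factorization q)
      = (mm.choose i) / q ^ (mm.choose i).factorization q * ((mm - i) / q ^ (mm - i).factorization q) := by
  have hid : mm.choose (i+1) * (i+1) = mm.choose i * (mm - i) := Nat.choose_succ_right_eq mm i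
  rw [← Nat.ordCompl_mul, ← Nat.ordCompl_mul, hid]

theorem inner_spec (M mm : Nat) (_hM : 1 ≤ M) (i : Nat) (hi : i + 1 ≤ mm) :
    ∀ (suf : List Nat) (ups : List Int) (lcmN : Nat) (cr : Int) (acc1 acc2 : List Int),
    suf.Nodup →
    (∀ q ∈ suf, q.Prime ∧ q ∣ M) →
    (∀ q ∈ suf, ¬ q ∣ lcmN) →
    1 ≤ lcmN →
    0 ≤ cr → cr < (lcmN : Int) →
    cr ≡ ((mm.choose (i+1) : Nat) : Int) [ZMOD (lcmN : Int)] →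
    List.Forall₂ (fun (q : Nat) (u : Int) =>
        u ≡ ((mm.choose i / q ^ (mm.choose i).factorization q : Nat) : Int)
          [ZMOD ((q ^ M.factorization q : Nat) : Int)]) suf ups →
    ∃ (cr' : Int) (ups' : List Int),
      ((suf.map (fun q : Nat => (q : Int))).zip
        ((suf.map (fun q : Nat => ((q ^ M.factorization q : Nat) : Int))).zip
          ((suf.map (fun q : Nat => ((q ^ (mm.choose i).factorization q : Nat) : Int))).zip ups))).foldl
        (innerStep (mm : Int) (i : Int)) ((lcmN : Int), cr, acc1, acc2)
      = (((lcmN * (suf.map (fun q => q ^ M.factorization q)).prod : Nat) : Int), cr',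
         acc1 ++ suf.map (fun q : Nat => ((q ^ (mm.choose (i+1)).factorization q : Nat) : Int)),
         acc2 ++ ups') ∧
      0 ≤ cr' ∧ cr' < ((lcmN * (suf.map (fun q => q ^ M.factorization q)).prod : Nat) : Int) ∧
      cr' ≡ ((mm.choose (i+1) : Nat) : Int) [ZMOD ((lcmN * (suf.map (fun q => q ^ M.factorization q)).prod : Nat) : Int)] ∧
      List.Forall₂ (fun (q : Nat) (u : Int) =>
        u ≡ ((mm.choose (i+1) / q ^ (mm.choose (i+1)).factorization q : Nat) : Int)
          [ZMOD ((q ^ M.factorization q : Nat) : Int)]) suf ups' := by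
  intro suf
  induction suf with
  | nil =>
    intro ups lcmN cr acc1 acc2 _ _ _ hl hcr0 hcr1 hcrm hf
    rcases List.forall₂_nil_left_iff.mp hf with rfl
    exact ⟨cr, [], by simp, by simpa using hcr0, by simpa using hcr1, by simpa using hcrm, List.Forall₂.nil⟩
  | cons q suf' ih =>
    intro ups lcmN cr acc1 acc2 hnd hpm hndv hl hcr0 hcr1 hcrm hf
    rcases List.forall₂_cons_left_iff.mp hf with ⟨u, ups0, hu, hf', rfl⟩
    have hq : q.Prime := (hpm q List.mem_cons_self).1
    have hqM : q ∣ M := (hpm q List.mem_cons_self).2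
    have hq2 : 2 ≤ q := hq.two_le
    -- abbreviations
    set C := mm.choose i with hC
    set C' := mm.choose (i+1) with hC'
    have hCpos : 0 < C := Nat.choose_pos (by omega)
    have hC'pos : 0 < C' := Nat.choose_pos hi
    set K := M.factorization q with hK
    set P : Nat := q ^ K with hP
    have hPpos : 0 < P := by positivity
    -- step computation
    simp only [List.map_cons, List.zip_cons_cons, List.foldl_cons]
    set Pz : Int := ((P : Nat) : Int) with hPz
    have hPz' : (0 : Int) < Pz := by rw [hPz]; exact_mod_cast hPpos
    have hsub : ((mm : Int)) - (i : Int) = ((mm - i : Nat) : Int) := by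
      have h : i ≤ mm := by omega
      push_cast [h]
      ring
    have hupos : 1 ≤ mm - i := by omega
    set mu : Int := (((mm - i) / q ^ (mm - i).factorization q : Nat) : Int) with hmu
    set mdn : Int := (((i+1) / q ^ (i+1).factorization q : Nat) : Int) with hmdn
    have hs1 : stripMulF (((mm : Int)) - (i : Int)).toNat (((mm : Int)) - (i : Int)) (q : Int)
          ((q ^ C.factorization q : Nat) : Int)
        = (mu, ((q ^ (C.factorization q + (mm - i).factorization q) : Nat) : Int)) := by
      rw [hsub, Int.toNat_natCast, stripMulF_spec (mm - i) (mm - i) q _ hq hupos le_rfl]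
      have hcast : ((q ^ C.factorization q : Nat) : Int) * ((q ^ (mm - i).factorization q : Nat) : Int)
          = ((q ^ (C.factorization q + (mm - i).factorization q) : Nat) : Int) := by
        push_cast [pow_add]
        ring
      rw [hcast]
    have hcfe := choose_fact_eq mm i q hi
    rw [← hC, ← hC'] at hcfe
    have hdown : (C.factorization q + (mm - i).factorization q) - (i+1).factorization q
        = C'.factorization q := by omega
    have hdle : (i+1).factorization q ≤ C.factorization q + (mm - i).factorization q := by omega
    have hiadd : ((i : Int)) + 1 = ((i + 1 : Nat) : Int) := by push_cast; ring
    have hs2 : stripDivF (((i : Int)) + 1).toNat (((i : Int)) + 1) (q : Int)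
          ((q ^ (C.factorization q + (mm - i).factorization q) : Nat) : Int)
        = (mdn, ((q ^ C'.factorization q : Nat) : Int)) := by
      rw [hiadd, Int.toNat_natCast, stripDivF_spec (i+1) (i+1) q _ hq (by omega) le_rfl hdle, hdown]
    set upv : Int := PySem.Int.mod (PySem.Int.mod (u * mu) Pz * invMod mdn Pz) Pz with hupv
    set m1v : Int := PySem.Int.mod (upv * ((q ^ C'.factorization q : Nat) : Int)) Pz with hm1v
    have hstep : innerStep (mm : Int) (i : Int) ((lcmN : Int), cr, acc1, acc2)
        ((q : Int), Pz, ((q ^ C.factorization q : Nat) : Int), u)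
        = ((lcmN : Int) * Pz, crt Pz m1v (lcmN : Int) cr,
           acc1 ++ [((q ^ C'.factorization q : Nat) : Int)], acc2 ++ [upv]) := by
      simp only [innerStep]
      rw [hs1, hs2]
    rw [hstep]
    -- number-theoretic facts for the head prime
    have hUCpos : 0 < (i+1) / q ^ (i+1).factorization q := Nat.ordCompl_pos q (by omega : i + 1 ≠ 0)
    have hgcd_mdn : Int.gcd mdn Pz = 1 := by
      rw [hmdn, hPz, Int.gcd_natCast_natCast]
      exact ((Nat.coprime_ordCompl hq (by omega : i + 1 ≠ 0)).symm).pow_right K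
    have hinv := invMod_spec mdn Pz (by rw [hmdn]; exact_mod_cast hUCpos)
      (by omega) hgcd_mdn
    have hcompl : (C / q ^ C.factorization q) * ((mm - i) / q ^ (mm - i).factorization q)
        = (C' / q ^ C'.factorization q) * ((i+1) / q ^ (i+1).factorization q) :=
      (choose_ordCompl_eq mm i q).symm
    have hupC : upv ≡ ((C' / q ^ C'.factorization q : Nat) : Int) [ZMOD Pz] := by
      have h1 : upv ≡ (u * mu) * invMod mdn Pz [ZMOD Pz] := by
        rw [hupv]
        exact (pymod_modEq _ _ hPz').trans ((pymod_modEq (u * mu) Pz hPz').mul_right _)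
      have h2 : (u * mu) * invMod mdn Pz
          ≡ (((C / q ^ C.factorization q : Nat) : Int) * mu) * invMod mdn Pz [ZMOD Pz] :=
        (hu.mul_right mu).mul_right _
      have h3 : (((C / q ^ C.factorization q : Nat) : Int) * mu) * invMod mdn Pz
          = ((C' / q ^ C'.factorization q : Nat) : Int) * (mdn * invMod mdn Pz) := by
        rw [hmu, hmdn, ← Nat.cast_mul, hcompl, Nat.cast_mul]
        ring
      have h4 : ((C' / q ^ C'.factorization q : Nat) : Int) * (mdn * invMod mdn Pz)
          ≡ ((C' / q ^ C'.factorization q : Nat) : Int) * 1 [ZMOD Pz] := hinv.mul_left _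
      calc upv ≡ (u * mu) * invMod mdn Pz [ZMOD Pz] := h1
        _ ≡ (((C / q ^ C.factorization q : Nat) : Int) * mu) * invMod mdn Pz [ZMOD Pz] := h2
        _ = ((C' / q ^ C'.factorization q : Nat) : Int) * (mdn * invMod mdn Pz) := h3
        _ ≡ ((C' / q ^ C'.factorization q : Nat) : Int) * 1 [ZMOD Pz] := h4
        _ = ((C' / q ^ C'.factorization q : Nat) : Int) := by ring
    have hm10 : 0 ≤ m1v := PySem.Int.mod_nonneg _ (by omega)
    have hm11 : m1v < Pz := PySem.Int.mod_lt _ (by omega)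
    have hm1C : m1v ≡ ((C' : Nat) : Int) [ZMOD Pz] := by
      have h5 : upv * ((q ^ C'.factorization q : Nat) : Int)
          ≡ ((C' / q ^ C'.factorization q : Nat) : Int) * ((q ^ C'.factorization q : Nat) : Int)
          [ZMOD Pz] := hupC.mul_right _
      have h6 : ((C' / q ^ C'.factorization q : Nat) : Int) * ((q ^ C'.factorization q : Nat) : Int)
          = ((C' : Nat) : Int) := by
        rw [← Nat.cast_mul, mul_comm]
        exact congrArg _ (Nat.ordProj_mul_ordCompl_eq_self C' q)
      rw [hm1v]
      calc PySem.Int.mod (upv * ((q ^ C'.factorization q : Nat) : Int)) Pz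
          ≡ upv * ((q ^ C'.factorization q : Nat) : Int) [ZMOD Pz] := pymod_modEq _ _ hPz'
        _ ≡ ((C' / q ^ C'.factorization q : Nat) : Int) * ((q ^ C'.factorization q : Nat) : Int) [ZMOD Pz] := h5
        _ = ((C' : Nat) : Int) := h6
    have hqlcm : ¬ q ∣ lcmN := hndv q List.mem_cons_self
    have hgcd_Pl : Int.gcd Pz ((lcmN : Nat) : Int) = 1 := by
      rw [hPz, Int.gcd_natCast_natCast]
      exact (hq.coprime_iff_not_dvd.mpr hqlcm).pow_left K
    obtain ⟨hc0, hc1, hcP, hcL⟩ := crt_spec Pz m1v ((lcmN : Nat) : Int) cr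
      (by omega) (by exact_mod_cast hl) hgcd_Pl hm10 hm11
    set cr2 := crt Pz m1v ((lcmN : Nat) : Int) cr with hcr2
    have hcrP : cr2 ≡ ((C' : Nat) : Int) [ZMOD Pz] := hcP.trans hm1C
    have hcrL : cr2 ≡ ((C' : Nat) : Int) [ZMOD ((lcmN : Nat) : Int)] := hcL.trans hcrm
    have hcast_lP : ((lcmN * P : Nat) : Int) = ((lcmN : Nat) : Int) * Pz := by
      rw [hPz]; push_cast; ring
    have hcomb : cr2 ≡ ((C' : Nat) : Int) [ZMOD ((lcmN * P : Nat) : Int)] := by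
      rw [hcast_lP]
      have hcop : ((lcmN : Nat) : Int).natAbs.Coprime (Pz).natAbs := by
        rw [hPz]
        simpa using ((hq.coprime_iff_not_dvd.mpr hqlcm).pow_left K).symm
      exact (Int.modEq_and_modEq_iff_modEq_mul hcop).mp ⟨hcrL, hcrP⟩
    have hbound2 : cr2 < ((lcmN * P : Nat) : Int) := by
      rw [hcast_lP]
      calc cr2 < Pz * ((lcmN : Nat) : Int) := hc1
        _ = ((lcmN : Nat) : Int) * Pz := by ring
    -- apply the induction hypothesis to the tail
    obtain ⟨cr', ups', hfold, hr0, hr1, hrm, hf2⟩ := ih ups0 (lcmN * P) cr2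
      (acc1 ++ [((q ^ C'.factorization q : Nat) : Int)]) (acc2 ++ [upv])
      (List.nodup_cons.mp hnd).2
      (fun p hp => hpm p (List.mem_cons_of_mem _ hp))
      (fun p hp => by
        intro hdvd
        have hpp : p.Prime := (hpm p (List.mem_cons_of_mem _ hp)).1
        rcases (Nat.Prime.dvd_mul hpp).mp hdvd with h | h
        · exact hndv p (List.mem_cons_of_mem _ hp) h
        · have : p = q := (Nat.prime_dvd_prime_iff_eq hpp hq).mp (hpp.dvd_of_dvd_pow h)
          exact (List.nodup_cons.mp hnd).1 (this ▸ hp))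
      (Nat.mul_pos (by omega) hPpos)
      hc0 hbound2 hcomb hf'
    rw [hcast_lP] at hfold
    rw [hfold]
    have he2 : (lcmN * ((q ^ M.factorization q) :: suf'.map (fun q => q ^ M.factorization q)).prod : Nat)
        = (lcmN * P * (suf'.map (fun q => q ^ M.factorization q)).prod : Nat) := by
      simp only [List.prod_cons, hP, hK]
      ring
    refine ⟨cr', upv :: ups', ?_, hr0, ?_, ?_, List.Forall₂.cons hupC hf2⟩
    · rw [he2]
      refine congrArg₂ Prod.mk rfl (congrArg₂ Prod.mk rfl (congrArg₂ Prod.mk ?_ ?_))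
      · simp
      · simp
    · rw [he2]
      exact hr1
    · rw [he2]
      exact hrm

-- ---------- the outer loop ----------
-- the body of A's `for i in range(n)` loop, named for the proofs
def outerStep (m : Int) (factors powers : List Int) (st : List Int × List Int × List Int) (i : Int) :
    List Int × List Int × List Int :=
  let inner := cmnInner m i (factors.zip (powers.zip (st.1.zip st.2.1)))
  (inner.2.2.1, inner.2.2.2, PySem.List.pySetD st.2.2 (i + 1) inner.2.1)

theorem cmn_eq_fold (m n mod : Int) :
    cmn m n mod = ((PySem.List.pyRange 0 (min m n) 1).foldl
      (outerStep m (getFactors mod)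
        ((getFactors mod).foldl (fun (st : Int × List Int) p =>
          let s := stripMulF st.1.toNat st.1 p 1
          (s.1, st.2 ++ [s.2])) (mod, [])).2)
      (List.replicate (getFactors mod).length 1, List.replicate (getFactors mod).length 1,
       PySem.List.pySetD (List.replicate (min m n + 1).toNat 0) 0 1)).2.2 := rfl

def altStep (m mod : Int) (st : List Int × Int) (i : Int) : List Int × Int :=
  (st.1 ++ [PySem.Int.mod st.2 mod], PySem.Int.floordiv (st.2 * (m - i)) (i + 1))

theorem cmn_alt_eq_fold (m n mod : Int) :
    cmn_alt m n mod = ((PySem.List.pyRange 0 (min m n + 1) 1).foldl (altStep m mod) ([], 1)).1 := rfl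

theorem forall₂_replicate {α β : Type} (R : α → β → Prop) (c : β) :
    ∀ (L : List α), (∀ q ∈ L, R q c) → List.Forall₂ R L (List.replicate L.length c)
  | [], _ => List.Forall₂.nil
  | q :: L, h => List.Forall₂.cons (h q List.mem_cons_self)
      (forall₂_replicate R c L (fun p hp => h p (List.mem_cons_of_mem _ hp)))

theorem set_map_range (f : Nat → Int) (n j : Nat) (v : Int) (_hj : j < n) :
    ((List.range n).map f).set j v = (List.range n).map (fun t => if t = j then v else f t) := by
  apply List.ext_getElem
  · simp
  · intro t h1 h2
    simp only [List.getElem_set, List.getElem_map, List.getElem_range]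
    split_ifs with ha hb hb
    · rfl
    · exact absurd ha.symm hb
    · exact absurd hb.symm ha
    · rfl

theorem outer_inv (M mm N : Nat) (hM1 : 1 ≤ M) (hNmm : N ≤ mm) (L : List Nat)
    (hnd : L.Nodup) (hpm : ∀ q ∈ L, q.Prime ∧ q ∣ M) (hcomp : ∀ q : Nat, q.Prime → q ∣ M → q ∈ L) :
    ∀ (k : Nat), k ≤ N →
    ∃ ups : List Int,
      (PySem.List.pyRange 0 (k : Int) 1).foldl
        (outerStep (mm : Int) (L.map (fun q : Nat => (q : Int)))
          (L.map (fun q : Nat => ((q ^ M.factorization q : Nat) : Int))))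
        (List.replicate (L.map (fun q : Nat => (q : Int))).length 1,
         List.replicate (L.map (fun q : Nat => (q : Int))).length 1,
         PySem.List.pySetD (List.replicate (N + 1) 0) 0 1)
      = (L.map (fun q : Nat => ((q ^ (mm.choose k).factorization q : Nat) : Int)), ups,
         (List.range (N + 1)).map
           (fun t => if t ≤ k then (if t = 0 then 1 else ((mm.choose t : Nat) : Int) % ((M : Nat) : Int)) else 0)) ∧
      List.Forall₂ (fun (q : Nat) (u : Int) =>
        u ≡ ((mm.choose k / q ^ (mm.choose k).factorization q : Nat) : Int)
          [ZMOD ((q ^ M.factorization q : Nat) : Int)]) L ups := by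
  intro k
  induction k with
  | zero =>
    intro _
    refine ⟨List.replicate L.length 1, ?_, ?_⟩
    · rw [show PySem.List.pyRange 0 (((0:Nat) : Int)) 1 = [] from PySem.List.pyRange_one_eq_nil (by simp)]
      simp only [List.foldl_nil, List.length_map]
      refine congrArg₂ Prod.mk ?_ (congrArg₂ Prod.mk rfl ?_)
      · rw [show (fun q : Nat => ((q ^ (mm.choose 0).factorization q : Nat) : Int))
            = (fun _ : Nat => (1 : Int)) from funext (fun q => by
              simp [Nat.choose_zero_right, Nat.factorization_one])]
        rw [List.map_const']
      · rw [show PySem.List.pySetD (List.replicate (N + 1) (0 : Int)) 0 1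
            = (List.replicate (N + 1) (0 : Int)).set 0 1 from by
            rw [show (0 : Int) = ((0 : Nat) : Int) from rfl, PySem.List.pySetD_natCast]]
        apply List.ext_getElem
        · simp
        · intro t h1 h2
          simp only [List.getElem_set, List.getElem_replicate, List.getElem_map, List.getElem_range]
          simp only [List.length_set, List.length_replicate] at h1
          split_ifs with ha hb hc <;> omega
    · exact forall₂_replicate _ _ L (fun q hq => by
        simp [Nat.choose_zero_right, Nat.factorization_one, Int.ModEq.refl])
  | succ k ih =>
    intro hk1
    obtain ⟨ups, hfold, hf⟩ := ih (by omega)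
    have hrange : PySem.List.pyRange 0 ((k + 1 : Nat) : Int) 1
        = PySem.List.pyRange 0 (k : Int) 1 ++ [(k : Int)] := by
      have : ((k + 1 : Nat) : Int) = (k : Int) + 1 := by push_cast; ring
      rw [this]
      exact PySem.List.pyRange_one_succ_right (by omega)
    rw [hrange, List.foldl_append, hfold]
    simp only [List.foldl_cons, List.foldl_nil]
    -- one outer step at i = k
    have hprodM : (L.map (fun q => q ^ M.factorization q)).prod = M :=
      prodPow M (by omega) L hnd hpm hcomp
    obtain ⟨cr', ups', hinner, hcr0, hcr1, hcrm, hf2⟩ :=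
      inner_spec M mm hM1 k (by omega) L ups 1 0 [] []
        hnd hpm (fun q hq => by
          intro hdvd
          exact (hpm q hq).1.ne_one (Nat.dvd_one.mp hdvd))
        le_rfl le_rfl (by norm_num) (by
          rw [show ((1 : Nat) : Int) = (1 : Int) from rfl]
          exact Int.modEq_one) hf
    rw [show outerStep (mm : Int) (L.map (fun q : Nat => (q : Int)))
          (L.map (fun q : Nat => ((q ^ M.factorization q : Nat) : Int)))
          (L.map (fun q : Nat => ((q ^ (mm.choose k).factorization q : Nat) : Int)), ups,
           (List.range (N + 1)).map
             (fun t => if t ≤ k then (if t = 0 then 1 else ((mm.choose t : Nat) : Int) % ((M : Nat) : Int)) else 0))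
          (k : Int)
        = (L.map (fun q : Nat => ((q ^ (mm.choose (k+1)).factorization q : Nat) : Int)), ups',
           PySem.List.pySetD ((List.range (N + 1)).map
             (fun t => if t ≤ k then (if t = 0 then 1 else ((mm.choose t : Nat) : Int) % ((M : Nat) : Int)) else 0))
             ((k : Int) + 1) cr') from by
      simp only [outerStep, cmnInner_eq]
      simp only [Nat.cast_one] at hinner
      rw [hinner]
      rfl]
    have hcrval : cr' = ((mm.choose (k+1) : Nat) : Int) % ((M : Nat) : Int) := by
      rw [one_mul] at hcr1 hcrm
      rw [hprodM] at hcr1 hcrm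
      have h1 : cr' % ((M : Nat) : Int) = ((mm.choose (k+1) : Nat) : Int) % ((M : Nat) : Int) := hcrm
      rw [← h1]
      exact (Int.emod_eq_of_lt hcr0 hcr1).symm
    refine ⟨ups', ?_, hf2⟩
    refine congrArg₂ Prod.mk rfl (congrArg₂ Prod.mk rfl ?_)
    rw [show ((k : Int) + 1) = ((k + 1 : Nat) : Int) from by push_cast; ring,
        PySem.List.pySetD_natCast, set_map_range _ _ _ _ (by omega), hcrval]
    apply List.map_congr_left
    intro t _
    by_cases h1 : t = k + 1
    · simp [h1]
    · by_cases h2 : t ≤ k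
      · simp [h1, h2, (by omega : t ≤ k + 1)]
      · have h3 : ¬ (t ≤ k + 1) := by omega
        have h4 : t ≠ 0 := by omega
        simp [h1, h2, h3]

theorem alt_inv (mm N : Nat) (mod : Int) (hmod : 1 ≤ mod) (hNmm : N ≤ mm) :
    ∀ (k : Nat), k ≤ N + 1 →
    (PySem.List.pyRange 0 (k : Int) 1).foldl (altStep (mm : Int) mod) ([], 1)
      = ((List.range k).map (fun t => ((mm.choose t : Nat) : Int) % mod), ((mm.choose k : Nat) : Int)) := by
  intro k
  induction k with
  | zero =>
    intro _
    rw [show PySem.List.pyRange 0 (((0:Nat) : Int)) 1 = [] from PySem.List.pyRange_one_eq_nil (by simp)]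
    simp
  | succ k ih =>
    intro hk1
    have hrange : PySem.List.pyRange 0 ((k + 1 : Nat) : Int) 1
        = PySem.List.pyRange 0 (k : Int) 1 ++ [(k : Int)] := by
      rw [show ((k + 1 : Nat) : Int) = (k : Int) + 1 from by push_cast; ring]
      exact PySem.List.pyRange_one_succ_right (by omega)
    rw [hrange, List.foldl_append, ih (by omega)]
    simp only [List.foldl_cons, List.foldl_nil, altStep]
    have hkmm : k ≤ mm := by omega
    refine congrArg₂ Prod.mk ?_ ?_
    · rw [PySem.Int.mod_eq_emod_of_pos (by omega), List.range_succ, List.map_append]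
      rfl
    · have hsub : ((mm : Int)) - (k : Int) = ((mm - k : Nat) : Int) := by push_cast [hkmm]; ring
      have hiadd : ((k : Int)) + 1 = ((k + 1 : Nat) : Int) := by push_cast; ring
      rw [hsub, hiadd, ← Nat.cast_mul, ← Nat.choose_succ_right_eq, PySem.Int.floordiv_natCast,
        Nat.mul_div_cancel _ (by omega : 0 < k + 1)]

theorem cmn_eq (m n mod : Int) (h1 : 1 ≤ mod) (h2 : 0 ≤ min m n) :
    cmn m n mod = (List.range ((min m n).toNat + 1)).map
      (fun t => if t = 0 then 1 else ((m.toNat.choose t : Nat) : Int) % mod) := by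
  set N := (min m n).toNat with hN
  set mm := m.toNat with hmm
  set M := mod.toNat with hM
  have hm0 : 0 ≤ m := le_trans h2 (min_le_left m n)
  have hmc : m = (mm : Int) := by omega
  have hminc : min m n = (N : Int) := by omega
  have hmodc : mod = (M : Int) := by omega
  have hM1 : 1 ≤ M := by omega
  have hNmm : N ≤ mm := by
    have := min_le_left m n
    omega
  obtain ⟨L, hLeq, hnd, hpm, hcomp⟩ := getFactors_spec mod h1
  rw [← hM] at hpm hcomp
  obtain ⟨c', hpw⟩ := powersFold M L M []
    (fun q hq => (hpm q hq).1) hM1 (fun _ _ => rfl) hnd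
  obtain ⟨ups, hfold, _⟩ := outer_inv M mm N hM1 hNmm L hnd hpm hcomp N le_rfl
  rw [cmn_eq_fold, hLeq, hminc]
  rw [show ((mod : Int), ([] : List Int)) = (((M : Nat) : Int), ([] : List Int)) from by rw [hmodc]]
  rw [hpw]
  rw [show (((N : Int)) + 1).toNat = N + 1 from by omega]
  rw [show (fun q : Nat => (q : Int)) = (fun q : Nat => (q : Int)) from rfl]
  rw [hmc]
  rw [show (List.map (fun q : Nat => ((q ^ M.factorization q : Nat) : Int)) L : List Int)
      = [] ++ List.map (fun q : Nat => ((q ^ M.factorization q : Nat) : Int)) L from rfl] at hfold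
  rw [hfold]
  apply List.map_congr_left
  intro t ht
  rw [List.mem_range] at ht
  rw [if_pos (by omega : t ≤ N), hmodc]

theorem cmn_alt_eq (m n mod : Int) (h1 : 1 ≤ mod) (h2 : 0 ≤ min m n) :
    cmn_alt m n mod
      = (List.range ((min m n).toNat + 1)).map (fun t => ((m.toNat.choose t : Nat) : Int) % mod) := by
  set N := (min m n).toNat with hN
  set mm := m.toNat with hmm
  have hm0 : 0 ≤ m := le_trans h2 (min_le_left m n)
  have hmc : m = (mm : Int) := by omega
  have hminc : min m n + 1 = ((N + 1 : Nat) : Int) := by push_cast; omega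
  have hNmm : N ≤ mm := by
    have := min_le_left m n
    omega
  rw [cmn_alt_eq_fold, hminc, hmc, alt_inv mm N mod h1 hNmm (N + 1) le_rfl]

-- ===== VERDICT (by name: the statement is the Claim_ definition above) =====
theorem cmn_spec : Claim_unchanged_cmn := by
  intro m n mod _ hPre hD'
  have hD1 : mod ≠ 1 := fun h => hD' h
  have h2 : 2 ≤ mod := by
    rcases hPre with ⟨hp1, _⟩
    omega
  rw [cmn_eq m n mod hPre.1 hPre.2, cmn_alt_eq m n mod hPre.1 hPre.2]
  apply List.map_congr_left
  intro t _
  by_cases ht : t = 0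
  · rw [if_pos ht, ht]
    simp only [Nat.choose_zero_right, Nat.cast_one]
    exact (Int.emod_eq_of_lt (by omega) (by omega)).symm
  · rw [if_neg ht]

theorem cmn_changed : Claim_changed_cmn := by unfold Claim_changed_cmn; decide

theorem cmn_tight : Claim_exact_cmn := by
  intro m n mod _ hPre hD heq
  have h1 : mod = 1 := hD
  subst h1
  rw [cmn_eq m n 1 hPre.1 hPre.2, cmn_alt_eq m n 1 hPre.1 hPre.2] at heq
  have h0 := congrArg (fun l => l[0]?) heq
  simp only [List.getElem?_map, List.getElem?_range,
    (by omega : 0 < (min m n).toNat + 1)] at h0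
  simp at h0
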